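-- pv_equiv track=rewrite | github.com/ayeshamaniyar26/studysphere-ai | modules/utils.py | format_flashcards
-- ===== SOURCE A (Python) =====
-- def format_flashcards(flashcard_text: str):
--     """Parse flashcard text into Q&A pairs"""
--     cards = []
--     lines = flashcard_text.strip().split("\n")
--     current_card = {}
--
--     for line in lines:
--         line = line.strip()
--         if not line:
--             continue
--
--         if line.startswith("Q:"):
--             if current_card:
--                 cards.append(current_card)
--             current_card = {"question": line[2:].strip(), "answer": ""}
--
--         elif line.startswith("A:") and current_card:
--             current_card["answer"] = line[2:].strip()
--
--     if current_card:
--         cards.append(current_card)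
--
--     return cards
-- ===== SOURCE B (Python) =====
-- def format_flashcards(flashcard_text: str):
--     """Parse flashcard text into Q&A pairs (group-then-map decomposition)."""
--     lines = [s for s in (raw.strip() for raw in flashcard_text.strip().split("\n")) if s]
--     groups = []
--     for line in lines:
--         if line.startswith("Q:"):
--             groups.append([line])
--         elif groups:
--             groups[-1].append(line)
--     return [
--         {
--             "question": g[0][2:].strip(),
--             "answer": next((l[2:].strip() for l in reversed(g) if l.startswith("A:")), ""),
--         }
--         for g in groups
--     ]
-- ===== Notes on version B (the rewrite author's own statement) =====
-- stated objective: alternative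
-- what changed: A's single pass with a mutable current-card dict is replaced by a group-then-map decomposition: clean and drop blank lines, split them into groups starting at each question-marker line (discarding lines before the first one), then map every group to a card whose answer comes from the last answer-marker line, found by a reversed scan.
import Mathlib
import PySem

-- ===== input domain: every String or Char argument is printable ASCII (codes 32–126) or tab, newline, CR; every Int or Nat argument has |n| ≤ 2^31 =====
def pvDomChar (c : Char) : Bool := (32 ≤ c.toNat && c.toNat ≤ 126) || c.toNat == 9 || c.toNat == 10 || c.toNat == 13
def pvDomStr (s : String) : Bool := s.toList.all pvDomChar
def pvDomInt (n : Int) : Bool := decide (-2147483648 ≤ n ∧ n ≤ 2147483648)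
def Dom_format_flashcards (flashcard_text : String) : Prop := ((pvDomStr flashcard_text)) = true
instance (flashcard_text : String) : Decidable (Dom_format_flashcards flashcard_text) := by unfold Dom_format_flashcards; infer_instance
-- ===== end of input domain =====

-- B replaces A's one-pass mutable-dict state machine by a group-then-map decomposition
-- (clean lines, group at "Q:" lines, map each group to a card); objective: alternative, same cost.

-- line[2:].strip()  (shared text helper used by both ports)
def pvContent (l : List Char) : String :=
  String.ofList (PySem.Chars.strip (PySem.List.slice l (some 2) none))

-- ===== PORT A =====
-- the body of A's for-loop: state = (cards, current_card); current_card = {} encoded as Dict.mk []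
def pvStepA (acc : List (PySem.Dict String String) × PySem.Dict String String) (line : List Char) :
    List (PySem.Dict String String) × PySem.Dict String String :=
  let l := PySem.Chars.strip line
  if l = [] then acc
  else if PySem.Chars.startswith l ['Q', ':'] then
    ((if acc.2.items ≠ [] then acc.1 ++ [acc.2] else acc.1),
      PySem.Dict.mk [("question", pvContent l), ("answer", "")])
  else if PySem.Chars.startswith l ['A', ':'] = true ∧ acc.2.items ≠ [] then
    (acc.1, acc.2.insert "answer" (pvContent l))
  else acc

def format_flashcards (flashcard_text : String) : List (List (String × String)) :=
  let lines := PySem.Chars.splitOn (PySem.Chars.strip flashcard_text.toList) ['\n']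
  let r := lines.foldl pvStepA ([], PySem.Dict.mk [])
  (if r.2.items ≠ [] then r.1 ++ [r.2] else r.1).map (·.items)

-- ===== PORT B =====
-- groups[-1].append(line)
def pvAppendToLast : List (List (List Char)) → List Char → List (List (List Char))
  | [], _ => []
  | [g], l => [g ++ [l]]
  | g :: g' :: gs, l => g :: pvAppendToLast (g' :: gs) l

-- the body of B's grouping loop
def pvStepB (gs : List (List (List Char))) (l : List Char) : List (List (List Char)) :=
  if PySem.Chars.startswith l ['Q', ':'] then gs ++ [[l]]
  else if gs ≠ [] then pvAppendToLast gs l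
  else gs

-- group -> card; every group starts with its "Q:" line, so g[0] is ported as headD []
def pvCardOf (g : List (List Char)) : List (String × String) :=
  [("question", pvContent (g.headD [])),
   ("answer",
     ((g.reverse.find? (fun l => PySem.Chars.startswith l ['A', ':'])).map pvContent).getD "")]

def format_flashcards_alt (flashcard_text : String) : List (List (String × String)) :=
  let lines := ((PySem.Chars.splitOn (PySem.Chars.strip flashcard_text.toList) ['\n']).map
      PySem.Chars.strip).filter (· ≠ [])
  let groups := lines.foldl pvStepB ([] : List (List (List Char)))
  groups.map pvCardOf

-- ===== PRECONDITION & SPEC =====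
def Spec_format_flashcards (flashcard_text : String) (out : List (List (String × String))) : Prop := out = format_flashcards_alt flashcard_text
instance (flashcard_text : String) (out : List (List (String × String))) : Decidable (Spec_format_flashcards flashcard_text out) := by unfold Spec_format_flashcards; infer_instance

-- ===== CLAIM (what is proved, stated in full; the proofs are below) =====
def Claim_equal_format_flashcards : Prop := ∀ (flashcard_text : String), Dom_format_flashcards flashcard_text → Spec_format_flashcards flashcard_text (format_flashcards flashcard_text)

-- ===== LEMMAS AND PROOFS =====

-- reference parser both ports are reduced to: pvH = "inside a card", pvG = "before the first Q"
def pvCard (q a : String) : List (String × String) := [("question", q), ("answer", a)]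

def pvH (q a : String) : List (List Char) → List (List (String × String))
  | [] => [pvCard q a]
  | l :: ls =>
    if PySem.Chars.startswith l ['Q', ':'] then pvCard q a :: pvH (pvContent l) "" ls
    else if PySem.Chars.startswith l ['A', ':'] then pvH q (pvContent l) ls
    else pvH q a ls

def pvG : List (List Char) → List (List (String × String))
  | [] => []
  | l :: ls => if PySem.Chars.startswith l ['Q', ':'] then pvH (pvContent l) "" ls else pvG ls

-- answer chosen from the non-Q lines of a group (B's reversed scan)
def pvAns (body : List (List Char)) : String :=
  ((body.reverse.find? (fun l => PySem.Chars.startswith l ['A', ':'])).map pvContent).getD ""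

-- B's grouping with current group g, expressed recursively
def pvHG : List (List Char) → List (List Char) → List (List (String × String))
  | g, [] => [pvCardOf g]
  | g, l :: ls =>
    if PySem.Chars.startswith l ['Q', ':'] then pvCardOf g :: pvHG [l] ls
    else pvHG (g ++ [l]) ls

lemma pv_nil_not_Q : PySem.Chars.startswith [] ['Q', ':'] = false := by decide
lemma pv_nil_not_A : PySem.Chars.startswith [] ['A', ':'] = false := by decide

lemma pv_Q_not_A (l : List Char) (h : PySem.Chars.startswith l ['Q', ':'] = true) :
    PySem.Chars.startswith l ['A', ':'] = false := by
  by_contra hA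
  rw [Bool.not_eq_false, PySem.Chars.startswith_iff] at hA
  rw [PySem.Chars.startswith_iff] at h
  obtain ⟨t, ht⟩ := h
  obtain ⟨u, hu⟩ := hA
  rw [← ht] at hu
  injection hu with h1 _
  exact absurd h1 (by decide)

lemma pv_insert_answer (q a v : String) :
    (PySem.Dict.mk [("question", q), ("answer", a)]).insert "answer" v
      = PySem.Dict.mk [("question", q), ("answer", v)] := by
  simp [PySem.Dict.insert]

def pvFinish (r : List (PySem.Dict String String) × PySem.Dict String String) :
    List (List (String × String)) :=
  (if r.2.items ≠ [] then r.1 ++ [r.2] else r.1).map (·.items)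

lemma pv_foldlA_card (ls : List (List Char)) :
    ∀ (cards : List (PySem.Dict String String)) (q a : String),
    pvFinish (ls.foldl pvStepA (cards, PySem.Dict.mk [("question", q), ("answer", a)]))
      = cards.map (·.items) ++ pvH q a (ls.map PySem.Chars.strip) := by
  induction ls with
  | nil => intro cards q a; simp [pvFinish, pvH, pvCard]
  | cons l ls ih =>
    intro cards q a
    simp only [List.foldl_cons, List.map_cons]
    by_cases h0 : PySem.Chars.strip l = []
    · rw [show pvStepA (cards, PySem.Dict.mk [("question", q), ("answer", a)]) l
            = (cards, PySem.Dict.mk [("question", q), ("answer", a)]) by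
        simp [pvStepA, h0]]
      rw [ih, h0]
      simp [pvH, pv_nil_not_Q, pv_nil_not_A]
    · by_cases hq : PySem.Chars.startswith (PySem.Chars.strip l) ['Q', ':'] = true
      · rw [show pvStepA (cards, PySem.Dict.mk [("question", q), ("answer", a)]) l
              = (cards ++ [PySem.Dict.mk [("question", q), ("answer", a)]],
                 PySem.Dict.mk [("question", pvContent (PySem.Chars.strip l)), ("answer", "")]) by
          simp [pvStepA, h0, hq]]
        rw [ih]
        simp [pvH, hq, pvCard]
      · by_cases ha : PySem.Chars.startswith (PySem.Chars.strip l) ['A', ':'] = true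
        · rw [show pvStepA (cards, PySem.Dict.mk [("question", q), ("answer", a)]) l
                = (cards, PySem.Dict.mk [("question", q), ("answer", pvContent (PySem.Chars.strip l))]) by
            simp [pvStepA, h0, hq, ha, pv_insert_answer]]
          rw [ih]
          simp [pvH, hq, ha]
        · rw [show pvStepA (cards, PySem.Dict.mk [("question", q), ("answer", a)]) l
                = (cards, PySem.Dict.mk [("question", q), ("answer", a)]) by
            simp [pvStepA, h0, hq, ha]]
          rw [ih]
          simp [pvH, hq, ha]

lemma pv_foldlA_empty (ls : List (List Char)) :
    ∀ (cards : List (PySem.Dict String String)),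
    pvFinish (ls.foldl pvStepA (cards, PySem.Dict.mk []))
      = cards.map (·.items) ++ pvG (ls.map PySem.Chars.strip) := by
  induction ls with
  | nil => intro cards; simp [pvFinish, pvG]
  | cons l ls ih =>
    intro cards
    simp only [List.foldl_cons, List.map_cons]
    by_cases hq : PySem.Chars.startswith (PySem.Chars.strip l) ['Q', ':'] = true
    · have h0 : PySem.Chars.strip l ≠ [] := by
        intro h; rw [h] at hq; exact absurd hq (by simp [pv_nil_not_Q])
      rw [show pvStepA (cards, PySem.Dict.mk []) l
            = (cards, PySem.Dict.mk [("question", pvContent (PySem.Chars.strip l)), ("answer", "")]) by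
          simp [pvStepA, h0, hq]]
      rw [pv_foldlA_card]
      simp [pvG, hq]
    · rw [show pvStepA (cards, PySem.Dict.mk []) l = (cards, PySem.Dict.mk []) by
        by_cases h0 : PySem.Chars.strip l = [] <;>
          simp [pvStepA, h0, hq]]
      rw [ih]
      have : pvG (PySem.Chars.strip l :: ls.map PySem.Chars.strip) = pvG (ls.map PySem.Chars.strip) := by
        simp [pvG, hq]
      rw [this]

lemma pv_H_filter (ls : List (List Char)) : ∀ (q a : String),
    pvH q a (ls.filter (· ≠ [])) = pvH q a ls := by
  induction ls with
  | nil => intro q a; rfl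
  | cons l ls ih =>
    intro q a
    simp only [ne_eq, decide_not] at ih ⊢
    by_cases h0 : l = []
    · subst h0
      simp only [List.filter_cons]
      simp [pvH, pv_nil_not_Q, pv_nil_not_A, ih]
    · simp only [List.filter_cons]
      rw [show (!decide (l = [])) = true by simp [h0]]
      by_cases hq : PySem.Chars.startswith l ['Q', ':'] = true <;>
        by_cases ha : PySem.Chars.startswith l ['A', ':'] = true <;>
        simp [pvH, hq, ha, ih]

lemma pv_G_filter (ls : List (List Char)) :
    pvG (ls.filter (· ≠ [])) = pvG ls := by
  induction ls with
  | nil => rfl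
  | cons l ls ih =>
    simp only [ne_eq, decide_not] at ih ⊢
    have hf := pv_H_filter ls
    simp only [ne_eq, decide_not] at hf
    by_cases h0 : l = []
    · subst h0
      simp only [List.filter_cons]
      simp [pvG, pv_nil_not_Q, ih]
    · simp only [List.filter_cons]
      rw [show (!decide (l = [])) = true by simp [h0]]
      by_cases hq : PySem.Chars.startswith l ['Q', ':'] = true <;>
        simp [pvG, hq, ih, hf]

lemma pv_appendToLast_append (gs : List (List (List Char))) (g : List (List Char)) (l : List Char) :
    pvAppendToLast (gs ++ [g]) l = gs ++ [g ++ [l]] := by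
  induction gs with
  | nil => rfl
  | cons x xs ih =>
    rcases xs with _ | ⟨y, ys⟩
    · simp [pvAppendToLast]
    · simpa [pvAppendToLast] using ih

lemma pv_foldlB_group (ls : List (List Char)) :
    ∀ (gs : List (List (List Char))) (g : List (List Char)),
    ((ls.foldl pvStepB (gs ++ [g])).map pvCardOf) = gs.map pvCardOf ++ pvHG g ls := by
  induction ls with
  | nil => intro gs g; simp [pvHG]
  | cons l ls ih =>
    intro gs g
    simp only [List.foldl_cons]
    by_cases hq : PySem.Chars.startswith l ['Q', ':'] = true
    · rw [show pvStepB (gs ++ [g]) l = (gs ++ [g]) ++ [[l]] by simp [pvStepB, hq]]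
      rw [ih (gs ++ [g]) [l]]
      simp [pvHG, hq]
    · rw [show pvStepB (gs ++ [g]) l = gs ++ [g ++ [l]] by
        simp [pvStepB, hq, pv_appendToLast_append]]
      rw [ih gs (g ++ [l])]
      simp [pvHG, hq]

lemma pv_cardOf_cons (q : List Char) (body : List (List Char))
    (hq : PySem.Chars.startswith q ['Q', ':'] = true) :
    pvCardOf (q :: body) = pvCard (pvContent q) (pvAns body) := by
  simp only [pvCardOf, pvCard, pvAns, List.headD_cons, List.reverse_cons, List.find?_append]
  rw [show (List.find? (fun l => PySem.Chars.startswith l ['A', ':']) [q]) = none by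
    simp [List.find?, pv_Q_not_A q hq]]
  simp

lemma pv_HG_eq_H (ls : List (List Char)) :
    ∀ (q : List Char) (body : List (List Char)),
    PySem.Chars.startswith q ['Q', ':'] = true →
    pvHG (q :: body) ls = pvH (pvContent q) (pvAns body) ls := by
  induction ls with
  | nil =>
    intro q body hq
    simp [pvHG, pvH, pv_cardOf_cons q body hq]
  | cons l ls ih =>
    intro q body hq
    by_cases hql : PySem.Chars.startswith l ['Q', ':'] = true
    · rw [show pvHG (q :: body) (l :: ls) = pvCardOf (q :: body) :: pvHG [l] ls by
        simp [pvHG, hql]]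
      rw [pv_cardOf_cons q body hq, ih l [] hql]
      simp [pvH, hql, pvAns]
    · rw [show pvHG (q :: body) (l :: ls) = pvHG (q :: (body ++ [l])) ls by
        simp [pvHG, hql]]
      rw [ih q (body ++ [l]) hq]
      by_cases hal : PySem.Chars.startswith l ['A', ':'] = true
      · have : pvAns (body ++ [l]) = pvContent l := by
          simp [pvAns, hal]
        rw [this]
        simp [pvH, hql, hal]
      · have : pvAns (body ++ [l]) = pvAns body := by
          simp [pvAns, hal]
        rw [this]
        simp [pvH, hql, hal]

lemma pv_foldlB_empty (ls : List (List Char)) :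
    ((ls.foldl pvStepB []).map pvCardOf) = pvG ls := by
  induction ls with
  | nil => rfl
  | cons l ls ih =>
    simp only [List.foldl_cons]
    by_cases hq : PySem.Chars.startswith l ['Q', ':'] = true
    · rw [show pvStepB [] l = [] ++ [[l]] by simp [pvStepB, hq]]
      rw [pv_foldlB_group ls [] [l]]
      rw [pv_HG_eq_H ls l [] hq]
      simp [pvG, hq, pvAns]
    · rw [show pvStepB [] l = [] by simp [pvStepB, hq]]
      rw [ih]
      simp [pvG, hq]

-- ===== VERDICT (by name: the statement is the Claim_ definition above) =====
theorem format_flashcards_spec : Claim_equal_format_flashcards := by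
  intro t _
  unfold Spec_format_flashcards
  have hA : format_flashcards t
      = pvG ((PySem.Chars.splitOn (PySem.Chars.strip t.toList) ['\n']).map PySem.Chars.strip) := by
    have h := pv_foldlA_empty (PySem.Chars.splitOn (PySem.Chars.strip t.toList) ['\n']) []
    simpa [format_flashcards, pvFinish] using h
  have hB : format_flashcards_alt t
      = pvG ((PySem.Chars.splitOn (PySem.Chars.strip t.toList) ['\n']).map PySem.Chars.strip) := by
    have h := pv_foldlB_empty
      (((PySem.Chars.splitOn (PySem.Chars.strip t.toList) ['\n']).map PySem.Chars.strip).filter (· ≠ []))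
    rw [pv_G_filter] at h
    simpa [format_flashcards_alt] using h
  rw [hA, hB]
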